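-- pv_equiv track=rewrite | github.com/olie-t/DSA | recursion/dynamic_programing.py | add_till_100
-- ===== SOURCE A (Python) =====
-- def add_till_100(array: list) -> int:
--     if len(array) == 0:
--         return 0
--     array_remainder = add_till_100(array[1:])
--     if array[0] + array_remainder > 100:
--         return array_remainder
--     else:
--         return array[0] + array_remainder
-- ===== SOURCE B (Python) =====
-- def add_till_100(array: list) -> int:
--     acc = 0
--     for x in reversed(array):
--         if x + acc <= 100:
--             acc += x
--     return acc
-- ===== Notes on version B (the rewrite author's own statement) =====
-- stated objective: faster
-- what changed: Replaced slicing recursion with a single reverse iteration keeping a running accumulator, avoiding O(n) list copies per step and recursion depth limits.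
import Mathlib
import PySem

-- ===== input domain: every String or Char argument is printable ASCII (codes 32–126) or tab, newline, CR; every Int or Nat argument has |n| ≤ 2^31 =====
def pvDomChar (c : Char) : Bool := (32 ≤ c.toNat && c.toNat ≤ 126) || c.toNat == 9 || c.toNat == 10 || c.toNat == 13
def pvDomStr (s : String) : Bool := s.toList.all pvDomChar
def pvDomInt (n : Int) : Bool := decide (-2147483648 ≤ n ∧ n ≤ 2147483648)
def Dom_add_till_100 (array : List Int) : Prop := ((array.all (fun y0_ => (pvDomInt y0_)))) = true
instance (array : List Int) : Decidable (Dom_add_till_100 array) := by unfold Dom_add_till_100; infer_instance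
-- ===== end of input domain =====

-- B replaces A's slicing recursion with one reverse-order fold carrying a running accumulator (objective: faster).

-- ===== PORT A =====
def add_till_100 (array : List Int) : Int :=
  match array with
  | [] => 0
  | x :: rest =>
    let array_remainder := add_till_100 rest
    if x + array_remainder > 100 then array_remainder
    else x + array_remainder

-- ===== PORT B =====
def add_till_100_alt (array : List Int) : Int :=
  array.reverse.foldl (fun acc x => if x + acc ≤ 100 then acc + x else acc) 0

-- ===== PRECONDITION & SPEC =====
def Spec_add_till_100 (array : List Int) (out : Int) : Prop := out = add_till_100_alt array
instance (array : List Int) (out : Int) : Decidable (Spec_add_till_100 array out) := by unfold Spec_add_till_100; infer_instance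

-- ===== CLAIM (what is proved, stated in full; the proofs are below) =====
def Claim_equal_add_till_100 : Prop := ∀ (array : List Int), Dom_add_till_100 array → Spec_add_till_100 array (add_till_100 array)

-- ===== LEMMAS AND PROOFS =====
theorem add_till_100_eq (array : List Int) : add_till_100 array = add_till_100_alt array := by
  induction array with
  | nil => rfl
  | cons x rest ih =>
    simp only [add_till_100, add_till_100_alt, List.reverse_cons, List.foldl_append,
      List.foldl_cons, List.foldl_nil] at *
    rw [ih]
    by_cases h : x + List.foldl (fun acc x => if x + acc ≤ 100 then acc + x else acc) 0 rest.reverse > 100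
    · rw [if_pos h, if_neg (by omega)]
    · rw [if_neg h, if_pos (by omega)]
      omega

-- ===== VERDICT (by name: the statement is the Claim_ definition above) =====
theorem add_till_100_spec : Claim_equal_add_till_100 := by
  intro array _
  exact add_till_100_eq array
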